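-- pv_equiv track=rewrite | github.com/josongsong/semantica-codegraph | tools/cwe/fixtures/cwe/fixtures/python/codeql/advanced_vulnerabilities.py | ldap_injection_safe
-- ===== SOURCE A (Python) =====
-- def ldap_injection_safe(username: str) -> str:
--     """LDAP injection - safe - SAFE"""
--
--     # SAFE: Escape LDAP special characters
--     def escape_ldap(s: str) -> str:
--         replacements = {"\\": "\\5c", "*": "\\2a", "(": "\\28", ")": "\\29", "\x00": "\\00"}
--         for char, escaped in replacements.items():
--             s = s.replace(char, escaped)
--         return s
--
--     escaped_username = escape_ldap(username)
--     return f"(&(uid={escaped_username})(objectClass=person))"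
-- ===== SOURCE B (Python) =====
-- def ldap_injection_safe(username: str) -> str:
--     """LDAP injection - safe - SAFE"""
--     replacements = {"\\": "\\5c", "*": "\\2a", "(": "\\28", ")": "\\29", "\x00": "\\00"}
--     escaped_username = "".join(replacements.get(ch, ch) for ch in username)
--     return f"(&(uid={escaped_username})(objectClass=person))"
-- ===== Notes on version B (the rewrite author's own statement) =====
-- stated objective: idiomatic
-- what changed: Replaced five sequential full-string str.replace passes with a single left-to-right traversal that maps each character independently through the replacement table and joins the pieces.
import Mathlib
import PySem

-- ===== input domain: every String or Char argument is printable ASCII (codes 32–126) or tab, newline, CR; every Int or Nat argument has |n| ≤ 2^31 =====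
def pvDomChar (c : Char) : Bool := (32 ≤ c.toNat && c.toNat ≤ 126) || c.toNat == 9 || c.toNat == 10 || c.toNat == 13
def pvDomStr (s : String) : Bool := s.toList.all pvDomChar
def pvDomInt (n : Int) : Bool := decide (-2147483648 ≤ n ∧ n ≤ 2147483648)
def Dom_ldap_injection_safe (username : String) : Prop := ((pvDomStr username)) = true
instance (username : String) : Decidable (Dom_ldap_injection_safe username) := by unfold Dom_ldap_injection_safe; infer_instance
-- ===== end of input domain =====

-- B replaces A's five sequential str.replace passes with one single-pass per-character
-- mapping joined at the end (idiomatic; return values proved equal on Dom).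

-- ===== PORT A =====
-- the dict literal of escape_ldap, iterated in insertion order
def ldapReplacements : List (String × String) :=
  [("\\", "\\5c"), ("*", "\\2a"), ("(", "\\28"), (")", "\\29"), ("\x00", "\\00")]

def escape_ldap (s : String) : String :=
  ldapReplacements.foldl (fun s p => PySem.Str.replace s p.1 p.2) s

def ldap_injection_safe (username : String) : String :=
  "(&(uid=" ++ escape_ldap username ++ ")(objectClass=person))"

-- ===== PORT B =====
-- replacements.get(ch, ch) of Source B, per character
def ldapEscChar (c : Char) : List Char :=
  if c = '\\' then "\\5c".toList
  else if c = '*' then "\\2a".toList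
  else if c = '(' then "\\28".toList
  else if c = ')' then "\\29".toList
  else if c = '\x00' then "\\00".toList
  else [c]

def ldap_injection_safe_alt (username : String) : String :=
  "(&(uid=" ++ String.ofList (username.toList.flatMap ldapEscChar) ++ ")(objectClass=person))"

-- ===== PRECONDITION & SPEC =====
def Spec_ldap_injection_safe (username : String) (out : String) : Prop := out = ldap_injection_safe_alt username
instance (username : String) (out : String) : Decidable (Spec_ldap_injection_safe username out) := by unfold Spec_ldap_injection_safe; infer_instance

-- ===== CLAIM (what is proved, stated in full; the proofs are below) =====
def Claim_equal_ldap_injection_safe : Prop := ∀ (username : String), Dom_ldap_injection_safe username → Spec_ldap_injection_safe username (ldap_injection_safe username)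

-- ===== LEMMAS AND PROOFS =====

-- replacing a single-character pattern is a flatMap over the characters
lemma replace_go_single (c : Char) (r : List Char) :
    ∀ (fuel : Nat) (l acc : List Char), l.length ≤ fuel →
      PySem.Chars.replace.go [c] r fuel l acc
        = acc.reverse ++ l.flatMap (fun x => if x = c then r else [x]) := by
  intro fuel
  induction fuel with
  | zero =>
    intro l acc h
    have : l = [] := List.eq_nil_of_length_eq_zero (Nat.le_zero.mp h)
    subst this
    simp [PySem.Chars.replace.go]
  | succ n ih =>
    intro l acc h
    cases l with
    | nil => simp [PySem.Chars.replace.go]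
    | cons x t =>
      by_cases hx : x = c
      · subst hx
        have hpre : List.isPrefixOf [x] (x :: t) = true := by
          simp [List.isPrefixOf]
        simp only [PySem.Chars.replace.go, hpre, if_pos, List.length_cons,
          List.length_nil, Nat.zero_add, List.drop_succ_cons, List.drop_zero]
        rw [ih t (r.reverse ++ acc) (by simpa using Nat.le_of_succ_le_succ h)]
        simp
      · have hpre : List.isPrefixOf [c] (x :: t) = false := by
          simp [List.isPrefixOf]
          intro hh; exact hx hh.symm
        simp only [PySem.Chars.replace.go, hpre]
        rw [ih t (x :: acc) (by simpa using Nat.le_of_succ_le_succ h)]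
        simp [hx]

lemma replace_single (s : List Char) (c : Char) (r : List Char) :
    PySem.Chars.replace s [c] r = s.flatMap (fun x => if x = c then r else [x]) := by
  simpa using replace_go_single c r s.length s [] le_rfl

-- the five sequential single-character replaces collapse to one per-character map
lemma escape_ldap_eq (u : String) :
    escape_ldap u = String.ofList (u.toList.flatMap ldapEscChar) := by
  show PySem.Str.replace (PySem.Str.replace (PySem.Str.replace (PySem.Str.replace
        (PySem.Str.replace u "\\" "\\5c") "*" "\\2a") "(" "\\28") ")" "\\29") "\x00" "\\00"
      = String.ofList (u.toList.flatMap ldapEscChar)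
  simp only [PySem.Str.replace, String.toList_ofList]
  have h1 : ("\\" : String).toList = ['\\'] := by decide
  have h2 : ("*" : String).toList = ['*'] := by decide
  have h3 : ("(" : String).toList = ['('] := by decide
  have h4 : (")" : String).toList = [')'] := by decide
  have h5 : ("\x00" : String).toList = ['\x00'] := by decide
  rw [h1, h2, h3, h4, h5]
  rw [replace_single, replace_single, replace_single, replace_single, replace_single]
  rw [List.flatMap_assoc, List.flatMap_assoc, List.flatMap_assoc, List.flatMap_assoc]
  congr 1
  apply List.flatMap_congr
  intro x _
  by_cases e1 : x = '\\'
  · subst e1; decide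
  by_cases e2 : x = '*'
  · subst e2; decide
  by_cases e3 : x = '('
  · subst e3; decide
  by_cases e4 : x = ')'
  · subst e4; decide
  by_cases e5 : x = '\x00'
  · subst e5; decide
  simp [ldapEscChar, e1, e2, e3, e4, e5]

-- ===== VERDICT (by name: the statement is the Claim_ definition above) =====
theorem ldap_injection_safe_spec : Claim_equal_ldap_injection_safe := by
  intro u _
  show ldap_injection_safe u = ldap_injection_safe_alt u
  unfold ldap_injection_safe ldap_injection_safe_alt
  rw [escape_ldap_eq]
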